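-- pv_equiv track=rewrite | github.com/Dearmener/yt_download | yt-dlp-tui.py | needs_login_hint
-- ===== SOURCE A (Python) =====
-- def needs_login_hint(url: str) -> bool:
--     login_sites = [
--         "bilibili.com", "b23.tv",
--         "youtube.com", "youtu.be",
--         "nicovideo.jp",
--         "twitter.com", "x.com",
--         "instagram.com",
--         "facebook.com",
--     ]
--     url_lower = url.lower()
--     return any(site in url_lower for site in login_sites)
-- ===== SOURCE B (Python) =====
-- def needs_login_hint(url: str) -> bool:
--     login_sites = [
--         "bilibili.com", "b23.tv",
--         "youtube.com", "youtu.be",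
--         "nicovideo.jp",
--         "twitter.com", "x.com",
--         "instagram.com",
--         "facebook.com",
--     ]
--     u = url.lower()
--     # single left-to-right scan over positions: at each position, test whether
--     # some known site name starts exactly there
--     for i in range(len(u)):
--         for site in login_sites:
--             if u.startswith(site, i):
--                 return True
--     return False
-- ===== Notes on version B (the rewrite author's own statement) =====
-- stated objective: alternative
-- what changed: Replaces the per-site whole-string substring test (`site in url_lower` for each site) with a single position-outer scan over the lowercased URL that checks at each index whether some site name starts exactly there (startswith), i.e. the loops are inverted and the inner substring search disappears.
import Mathlib
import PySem

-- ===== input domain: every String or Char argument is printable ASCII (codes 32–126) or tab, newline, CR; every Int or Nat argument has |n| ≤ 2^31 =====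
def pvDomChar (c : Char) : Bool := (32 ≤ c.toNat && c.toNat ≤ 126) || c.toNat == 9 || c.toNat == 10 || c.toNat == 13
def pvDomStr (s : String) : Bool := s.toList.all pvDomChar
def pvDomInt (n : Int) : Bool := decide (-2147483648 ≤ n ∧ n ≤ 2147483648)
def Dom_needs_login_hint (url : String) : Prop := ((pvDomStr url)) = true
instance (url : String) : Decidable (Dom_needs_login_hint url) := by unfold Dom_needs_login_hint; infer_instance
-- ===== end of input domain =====

-- B replaces A's per-site whole-string substring tests by a single position-outer
-- scan checking startswith at each index (alternative decomposition, same cost).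

-- ===== PORT A =====
def loginSitesA : List String :=
  ["bilibili.com", "b23.tv", "youtube.com", "youtu.be", "nicovideo.jp",
   "twitter.com", "x.com", "instagram.com", "facebook.com"]

def needs_login_hint (url : String) : Bool :=
  let url_lower := PySem.Str.lower url
  loginSitesA.any (fun site => PySem.Str.isIn site url_lower)

-- ===== PORT B =====
def loginSitesB : List (List Char) :=
  ["bilibili.com".toList, "b23.tv".toList, "youtube.com".toList, "youtu.be".toList,
   "nicovideo.jp".toList, "twitter.com".toList, "x.com".toList, "instagram.com".toList,
   "facebook.com".toList]

def needs_login_hint_alt (url : String) : Bool :=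
  let u := PySem.Chars.lower url.toList
  (List.range u.length).any (fun i =>
    loginSitesB.any (fun site => PySem.Chars.startswith (u.drop i) site))

-- ===== PRECONDITION & SPEC =====
def Spec_needs_login_hint (url : String) (out : Bool) : Prop := out = needs_login_hint_alt url
instance (url : String) (out : Bool) : Decidable (Spec_needs_login_hint url out) := by unfold Spec_needs_login_hint; infer_instance

-- ===== CLAIM (what is proved, stated in full; the proofs are below) =====
def Claim_equal_needs_login_hint : Prop := ∀ (url : String), Dom_needs_login_hint url → Spec_needs_login_hint url (needs_login_hint url)

-- ===== LEMMAS AND PROOFS =====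

-- a nonempty pattern occurring as an infix must start at a real index
theorem isIn_iff_exists_lt {sub u : List Char} (h : sub ≠ []) :
    PySem.Chars.isIn sub u = true ↔ ∃ i < u.length, sub <+: u.drop i := by
  rw [← PySem.Chars.exists_prefix_drop_iff_isIn]
  constructor
  · rintro ⟨j, hj⟩
    by_cases hlt : j < u.length
    · exact ⟨j, hlt, hj⟩
    · exfalso
      have : u.drop j = [] := List.drop_eq_nil_of_le (by omega)
      rw [this] at hj
      exact h (List.prefix_nil.mp hj)
  · rintro ⟨i, _, hi⟩
    exact ⟨i, hi⟩

theorem sitesB_eq : loginSitesB = loginSitesA.map String.toList := by decide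

theorem main_eq : ∀ (url : String), needs_login_hint url = needs_login_hint_alt url := by
  intro url
  unfold needs_login_hint needs_login_hint_alt
  simp only [sitesB_eq]
  set u := PySem.Chars.lower url.toList with hu
  rw [Bool.eq_iff_iff]
  simp only [List.any_eq_true, List.mem_range, List.mem_map, PySem.Str.isIn_eq,
    PySem.Str.toList_lower, ← hu, PySem.Chars.startswith_iff]
  constructor
  · rintro ⟨site, hmem, hin⟩
    have hne : site.toList ≠ [] := by
      fin_cases hmem <;> decide
    obtain ⟨i, hilt, hpre⟩ := (isIn_iff_exists_lt hne).mp hin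
    exact ⟨i, hilt, site.toList, ⟨site, hmem, rfl⟩, hpre⟩
  · rintro ⟨i, hilt, _, ⟨site, hmem, rfl⟩, hpre⟩
    have hne : site.toList ≠ [] := by
      fin_cases hmem <;> decide
    exact ⟨site, hmem, (isIn_iff_exists_lt hne).mpr ⟨i, hilt, hpre⟩⟩

-- ===== VERDICT (by name: the statement is the Claim_ definition above) =====

theorem needs_login_hint_spec : Claim_equal_needs_login_hint := by
  intro url _
  exact main_eq url
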